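-- pv_equiv track=rewrite | github.com/heurtay/UP | Новая папка (9)/УП9/УП9.py | k_swaps_to_sort
-- ===== SOURCE A (Python) =====
-- def k_swaps_to_sort(n, k):
--     """
--     Генерирует перестановку чисел от 1 до n, которая требует ровно k обменов
--     при сортировке пузырьком.
--     """
--     result = []  # Список, в который будем добавлять числа
--     inv_remaining = k  # Количество "инверсий" (обменов), которые нужно создать
--
--     # Итерируем от 1 до n, добавляя каждое число в список
--     for i in range(1, n + 1):
--         current_length = len(result)  # Текущая длина списка result
--
--         # Вычисляем x: сколько элементов i "пройдет" мимо, создавая x инверсий.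
--         # Это не превысит inv_remaining и текущую длину списка.
--         x = min(inv_remaining, current_length)
--
--         # Вычисляем позицию для вставки: current_length - x означает
--         # вставку на x позиций от конца списка.
--         pos = current_length - x
--
--         result.insert(pos, i)  # Вставляем число i на вычисленную позицию
--         inv_remaining -= x  # Уменьшаем количество оставшихся инверсий
--
--     return result
-- ===== SOURCE B (Python) =====
-- def k_swaps_to_sort(n, k):
--     # Closed form: a fully reversed prefix [m..1], one partially advanced
--     # element m+1, and a sorted tail -- built directly in O(n).
--     kk = k if k > 0 else 0
--     m = 0
--     while m < n and m * (m + 1) // 2 <= kk: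
--         m += 1
--     if m >= n:
--         return list(range(n, 0, -1))
--     x = kk - m * (m - 1) // 2
--     return list(range(m, x, -1)) + [m + 1] + list(range(x, 0, -1)) + list(range(m + 2, n + 1))
-- ===== Notes on version B (the rewrite author's own statement) =====
-- stated objective: faster
-- what changed: A builds the permutation by inserting each of 1..n into a growing list (each insert shifts elements); B computes the cut point m with m(m-1)/2 <= max(k,0) analytically with a simple while loop and emits the closed form reversed-prefix ++ partially-advanced element ++ sorted-tail directly from three ranges in one pass.
import Mathlib
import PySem

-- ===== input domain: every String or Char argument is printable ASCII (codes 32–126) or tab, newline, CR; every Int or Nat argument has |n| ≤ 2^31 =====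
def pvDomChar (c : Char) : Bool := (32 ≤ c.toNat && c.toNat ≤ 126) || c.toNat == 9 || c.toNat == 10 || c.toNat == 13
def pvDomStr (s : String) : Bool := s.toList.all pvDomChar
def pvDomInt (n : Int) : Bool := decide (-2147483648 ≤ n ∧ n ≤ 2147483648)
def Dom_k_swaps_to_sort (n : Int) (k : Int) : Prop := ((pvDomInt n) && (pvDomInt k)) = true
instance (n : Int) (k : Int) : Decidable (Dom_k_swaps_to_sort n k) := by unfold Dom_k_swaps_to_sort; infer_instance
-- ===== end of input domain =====

-- B replaces A's insert-one-element-per-iteration O(n^2) loop by the closed form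
-- (reversed prefix ++ one partially-advanced element ++ sorted tail), built in one pass.

-- ===== PORT A =====
def k_swaps_to_sort (n : Int) (k : Int) : List Int :=
  ((PySem.List.pyRange 1 (n + 1) 1).foldl
    (fun (st : List Int × Int) i =>
      let result := st.1
      let invRemaining := st.2
      let currentLength := PySem.List.len result
      let x := min invRemaining currentLength
      let pos := currentLength - x
      (PySem.List.insert result pos i, invRemaining - x))
    ([], k)).1

-- ===== PORT B =====
-- the while-loop 'while m < n and m*(m+1)//2 <= kk: m += 1' of Source B
def kstsFindM (n : Int) (kk : Int) (m : Int) : Int :=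
  if h : m < n then
    if PySem.Int.floordiv (m * (m + 1)) 2 ≤ kk then kstsFindM n kk (m + 1) else m
  else m
termination_by (n - m).toNat
decreasing_by omega

def k_swaps_to_sort_alt (n : Int) (k : Int) : List Int :=
  let kk := if k > 0 then k else 0
  let m := kstsFindM n kk 0
  if n ≤ m then
    PySem.List.pyRange n 0 (-1)
  else
    let x := kk - PySem.Int.floordiv (m * (m - 1)) 2
    PySem.List.pyRange m x (-1) ++ [m + 1] ++ PySem.List.pyRange x 0 (-1)
      ++ PySem.List.pyRange (m + 2) (n + 1) 1

-- ===== PRECONDITION & SPEC =====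
def Spec_k_swaps_to_sort (n : Int) (k : Int) (out : List Int) : Prop := out = k_swaps_to_sort_alt n k
instance (n : Int) (k : Int) (out : List Int) : Decidable (Spec_k_swaps_to_sort n k out) := by unfold Spec_k_swaps_to_sort; infer_instance

-- ===== CLAIM (what is proved, stated in full; the proofs are below) =====
def Claim_equal_k_swaps_to_sort : Prop := ∀ (n : Int) (k : Int), Dom_k_swaps_to_sort n k → Spec_k_swaps_to_sort n k (k_swaps_to_sort n k)

-- ===== LEMMAS AND PROOFS =====

-- A's loop body, named for the proofs (definitionally A's inline lambda)
def pvStep (st : List Int × Int) (i : Int) : List Int × Int :=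
  let result := st.1
  let invRemaining := st.2
  let currentLength := PySem.List.len result
  let x := min invRemaining currentLength
  let pos := currentLength - x
  (PySem.List.insert result pos i, invRemaining - x)

theorem A_eq_foldl (n k : Int) :
    k_swaps_to_sort n k = ((PySem.List.pyRange 1 (n + 1) 1).foldl pvStep ([], k)).1 := rfl

-- triangular numbers: tri N = N*(N-1)/2
def tri : Nat → Nat
  | 0 => 0
  | N + 1 => tri N + N

theorem tri_mono {a b : Nat} (h : a ≤ b) : tri a ≤ tri b := by
  induction b with
  | zero => simp_all
  | succ b ih =>
    rcases Nat.lt_or_ge a (b + 1) with h' | h'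
    · exact le_trans (ih (by omega)) (by simp [tri])
    · have : a = b + 1 := by omega
      simp [this]

theorem two_tri (N : Nat) : 2 * tri (N + 1) = N * (N + 1) := by
  induction N with
  | zero => simp [tri]
  | succ N ih =>
    have h : tri (N + 1 + 1) = tri (N + 1) + (N + 1) := rfl
    rw [h]
    nlinarith [ih]

theorem floordiv_cond (m : Nat) :
    PySem.Int.floordiv ((m : Int) * ((m : Int) + 1)) 2 = (tri (m + 1) : Int) := by
  have h1 : ((m : Int) * ((m : Int) + 1)) = ((m * (m + 1) : Nat) : Int) := by push_cast; ring
  rw [h1]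
  have h2 : PySem.Int.floordiv ((m * (m + 1) : Nat) : Int) ((2 : Nat) : Int)
      = (((m * (m + 1)) / 2 : Nat) : Int) := PySem.Int.floordiv_natCast _ _
  have h3 : (m * (m + 1)) / 2 = tri (m + 1) := by
    have := two_tri m; omega
  rw [show ((2:Nat):Int) = 2 from rfl] at h2
  rw [h2, h3]

theorem floordiv_tri (m : Nat) :
    PySem.Int.floordiv ((m : Int) * ((m : Int) - 1)) 2 = (tri m : Int) := by
  cases m with
  | zero => simp [tri]
  | succ m =>
    have h1 : (((m + 1 : Nat) : Int) * (((m + 1 : Nat) : Int) - 1))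
        = ((m : Int) * ((m : Int) + 1)) := by push_cast; ring
    rw [h1, floordiv_cond]

theorem kstsFindM_spec (N : Nat) (kk : Int) (m : Nat) (hm : m ≤ N)
    (htri : (tri m : Int) ≤ kk) :
    ∃ M : Nat, kstsFindM (N : Int) kk (m : Int) = (M : Int) ∧ m ≤ M ∧ M ≤ N ∧
      (tri M : Int) ≤ kk ∧ (M < N → kk < (tri (M + 1) : Int)) := by
  rw [kstsFindM]
  by_cases hlt : (m : Int) < (N : Int)
  · have hmN : m < N := by exact_mod_cast hlt
    rw [dif_pos hlt]
    by_cases hc : PySem.Int.floordiv ((m : Int) * ((m : Int) + 1)) 2 ≤ kk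
    · rw [if_pos hc]
      rw [floordiv_cond] at hc
      have hrec := kstsFindM_spec N kk (m + 1) (by omega) hc
      obtain ⟨M, hM, h1, h2, h3, h4⟩ := hrec
      refine ⟨M, ?_, by omega, h2, h3, h4⟩
      rw [← hM]; norm_num
    · rw [if_neg hc]
      rw [floordiv_cond] at hc
      exact ⟨m, rfl, le_refl _, by omega, htri, fun _ => by omega⟩
  · rw [dif_neg hlt]
    have hmN : ¬ (m < N) := by exact_mod_cast hlt
    exact ⟨m, rfl, le_refl _, hm, htri, fun h => absurd h hmN⟩
termination_by N - m

theorem tri_window_unique {kk : Int} {M₁ M₂ : Nat}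
    (h1 : (tri M₁ : Int) ≤ kk) (h2 : kk < (tri (M₁ + 1) : Int))
    (h3 : (tri M₂ : Int) ≤ kk) (h4 : kk < (tri (M₂ + 1) : Int)) : M₁ = M₂ := by
  by_contra hne
  rcases Nat.lt_or_ge M₁ M₂ with h | h
  · have ha := tri_mono (show M₁ + 1 ≤ M₂ by omega)
    have hb : (tri (M₁ + 1) : Int) ≤ (tri M₂ : Int) := by exact_mod_cast ha
    omega
  · have hlt : M₂ < M₁ := by omega
    have ha := tri_mono (show M₂ + 1 ≤ M₁ by omega)
    have hb : (tri (M₂ + 1) : Int) ≤ (tri M₁ : Int) := by exact_mod_cast ha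
    omega


-- zeta-reduced form of B's port (definitional)
theorem alt_def (n k : Int) : k_swaps_to_sort_alt n k =
    (if n ≤ kstsFindM n (if k > 0 then k else 0) 0 then
      PySem.List.pyRange n 0 (-1)
    else
      PySem.List.pyRange (kstsFindM n (if k > 0 then k else 0) 0)
          ((if k > 0 then k else 0) - PySem.Int.floordiv
            (kstsFindM n (if k > 0 then k else 0) 0 * (kstsFindM n (if k > 0 then k else 0) 0 - 1)) 2) (-1)
        ++ [kstsFindM n (if k > 0 then k else 0) 0 + 1]
        ++ PySem.List.pyRange ((if k > 0 then k else 0) - PySem.Int.floordiv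
            (kstsFindM n (if k > 0 then k else 0) 0 * (kstsFindM n (if k > 0 then k else 0) 0 - 1)) 2) 0 (-1)
        ++ PySem.List.pyRange (kstsFindM n (if k > 0 then k else 0) 0 + 2) (n + 1) 1) := rfl

theorem kk_nonneg (k : Int) : 0 ≤ (if k > 0 then k else 0) := by split_ifs <;> omega

theorem alt_eq_full (N : Nat) (k : Int)
    (h : (tri N : Int) ≤ (if k > 0 then k else 0)) :
    k_swaps_to_sort_alt (N : Int) k = PySem.List.pyRange (N : Int) 0 (-1) := by
  rw [alt_def]
  obtain ⟨M, hM, _, h2, h3, h4⟩ :=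
    kstsFindM_spec N (if k > 0 then k else 0) 0 (Nat.zero_le _) (by simp [tri]; exact kk_nonneg k)
  have hMN : M = N := by
    by_contra hne
    have hlt : M < N := by omega
    have ha := tri_mono (show M + 1 ≤ N by omega)
    have hc : (tri (M + 1) : Int) ≤ (tri N : Int) := by exact_mod_cast ha
    have := h4 hlt
    omega
  subst hMN
  rw [show ((0:Nat):Int) = 0 from rfl] at hM
  rw [hM, if_pos (le_refl _)]

theorem alt_eq_partial (N M : Nat) (k : Int) (hMN : M < N)
    (h1 : (tri M : Int) ≤ (if k > 0 then k else 0))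
    (h2 : (if k > 0 then k else 0) < (tri (M + 1) : Int)) :
    k_swaps_to_sort_alt (N : Int) k =
      PySem.List.pyRange (M : Int) ((if k > 0 then k else 0) - (tri M : Int)) (-1)
      ++ [(M : Int) + 1]
      ++ PySem.List.pyRange ((if k > 0 then k else 0) - (tri M : Int)) 0 (-1)
      ++ PySem.List.pyRange ((M : Int) + 2) ((N : Int) + 1) 1 := by
  rw [alt_def]
  obtain ⟨M', hM', _, h2', h3', h4'⟩ :=
    kstsFindM_spec N (if k > 0 then k else 0) 0 (Nat.zero_le _) (by simp [tri]; exact kk_nonneg k)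
  have hM'N : M' < N := by
    by_contra hne
    have hEq : M' = N := by omega
    subst hEq
    have ha := tri_mono (show M + 1 ≤ M' by omega)
    have hc : (tri (M + 1) : Int) ≤ (tri M' : Int) := by exact_mod_cast ha
    omega
  have heq : M' = M := tri_window_unique h3' (h4' hM'N) h1 h2
  subst heq
  rw [show ((0:Nat):Int) = 0 from rfl] at hM'
  rw [hM']
  rw [if_neg (show ¬ ((N:Int) ≤ (M':Int)) from by exact_mod_cast Nat.not_le.mpr hM'N)]
  rw [floordiv_tri]

-- split a countdown range
theorem pyRange_neg_one_append (a m b : Int) (h1 : b ≤ m) (h2 : m ≤ a) :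
    PySem.List.pyRange a b (-1) = PySem.List.pyRange a m (-1) ++ PySem.List.pyRange m b (-1) := by
  rw [PySem.List.pyRange_neg_one_eq_reverse, PySem.List.pyRange_neg_one_eq_reverse,
    PySem.List.pyRange_neg_one_eq_reverse,
    PySem.List.pyRange_one_append (b + 1) (m + 1) (a + 1) (by omega) (by omega)]
  simp

-- the three shapes A's loop body takes, depending on the remaining-inversion count
theorem pvStep_rem0 (R : List Int) (i : Int) : pvStep (R, 0) i = (R ++ [i], 0) := by
  have h0 : min (0:Int) (PySem.List.len R) = 0 :=
    min_eq_left (by rw [PySem.List.len_eq]; exact Int.natCast_nonneg _)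
  simp only [pvStep, h0, sub_zero, PySem.List.insert_len]

theorem pvStep_mid (R : List Int) (r i : Int) (hr : r ≤ PySem.List.len R) :
    pvStep (R, r) i = (PySem.List.insert R (PySem.List.len R - r) i, 0) := by
  have h0 : min r (PySem.List.len R) = r := min_eq_left hr
  simp only [pvStep, h0, sub_self]

theorem pvStep_big (R : List Int) (r i : Int) (hr : PySem.List.len R ≤ r) :
    pvStep (R, r) i = (i :: R, r - PySem.List.len R) := by
  have h0 : min r (PySem.List.len R) = PySem.List.len R := min_eq_right hr
  simp only [pvStep, h0, sub_self, PySem.List.insert_zero]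

theorem len_countdown (N : Nat) : PySem.List.len (PySem.List.pyRange (N : Int) 0 (-1)) = (N : Int) := by
  rw [PySem.List.len_eq, PySem.List.length_pyRange_neg_one]
  omega

theorem state_inv (N : Nat) (k : Int) (hN : 1 ≤ N) :
    (PySem.List.pyRange 1 ((N : Int) + 1) 1).foldl pvStep ([], k)
      = (k_swaps_to_sort_alt (N : Int) k,
         max ((if k > 0 then k else 0) - (tri N : Int)) 0) := by
  induction N, hN using Nat.le_induction with
  | base =>
    rw [show ((1:Nat):Int) = 1 from rfl]
    rw [show (1:Int) + 1 = 1 + 1 from rfl]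
    rw [PySem.List.pyRange_one_cons (by omega : (1:Int) < 1 + 1)]
    rw [PySem.List.pyRange_one_eq_nil (by omega : (1:Int) + 1 ≤ 1 + 1)]
    simp only [List.foldl_cons, List.foldl_nil]
    have halt := alt_eq_full 1 k (by simp [tri]; exact kk_nonneg k)
    norm_num at halt
    rw [halt]
    rw [PySem.List.pyRange_neg_one_cons (by omega : (0:Int) < 1)]
    rw [show (1:Int) - 1 = 0 from rfl]
    rw [PySem.List.pyRange_neg_one_eq_nil (le_refl 0)]
    simp only [pvStep, Prod.mk.injEq]
    constructor
    · have hlen : PySem.List.len ([] : List Int) = 0 := by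
        rw [PySem.List.len_eq]; simp
      rw [hlen]
      simp [PySem.List.insert]
    · have hlen : PySem.List.len ([] : List Int) = 0 := by
        rw [PySem.List.len_eq]; simp
      rw [hlen]
      simp only [show tri 1 = 0 from rfl, Nat.cast_zero, sub_zero]
      split_ifs <;> omega
  | succ N hN ih =>
    obtain ⟨kk, hkk⟩ : ∃ kk, (if k > 0 then k else 0) = kk := ⟨_, rfl⟩
    have hkk0 : 0 ≤ kk := hkk ▸ kk_nonneg k
    have htriS : ((tri (N + 1) : Nat) : Int) = (tri N : Int) + (N : Int) := by
      show (((tri N + N : Nat)) : Int) = _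
      push_cast; ring
    have hcast : ((N + 1 : Nat) : Int) = (N : Int) + 1 := by push_cast; ring
    rw [hcast, PySem.List.pyRange_one_succ_right (by omega : (1:Int) ≤ (N : Int) + 1),
      List.foldl_append, ih, hkk]
    simp only [List.foldl_cons, List.foldl_nil]
    by_cases hlow : kk < (tri N : Int)
    · -- remaining inversions already exhausted: element is appended at the end
      obtain ⟨M, hM, -, hMle, htriM, hwin⟩ :=
        kstsFindM_spec N kk 0 (Nat.zero_le _) (by simp [tri]; exact hkk0)
      have hlt : M < N := by
        rcases Nat.lt_or_ge M N with h | h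
        · exact h
        · have hEq : M = N := by omega
          subst hEq; omega
      have hpN := alt_eq_partial N M k hlt (by rw [hkk]; exact htriM)
        (by rw [hkk]; exact hwin hlt)
      rw [hkk] at hpN
      have hpS := alt_eq_partial (N + 1) M k (by omega) (by rw [hkk]; exact htriM)
        (by rw [hkk]; exact hwin hlt)
      rw [hkk, hcast] at hpS
      rw [PySem.List.pyRange_one_succ_right
        (show ((M:Int) + 2) ≤ (N : Int) + 1 by omega)] at hpS
      rw [hpN, hpS]
      rw [show max (kk - ((tri N : Nat) : Int)) 0 = 0 from by omega]
      rw [pvStep_rem0]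
      simp only [Prod.mk.injEq]
      constructor
      · simp [List.append_assoc]
      · rw [htriS]; omega
    · by_cases hmid : kk < (tri N : Int) + (N : Int)
      · -- the new element consumes the last kk - tri N inversions
        have hfull := alt_eq_full N k (by rw [hkk]; omega)
        rw [hfull]
        have hpS := alt_eq_partial (N + 1) N k (by omega) (by rw [hkk]; omega)
          (by rw [hkk, htriS]; omega)
        rw [hkk, hcast] at hpS
        rw [PySem.List.pyRange_one_eq_nil
          (show ((N:Int) + 1) + 1 ≤ (N : Int) + 2 by omega)] at hpS
        rw [hpS]
        rw [show max (kk - ((tri N : Nat) : Int)) 0 = kk - ((tri N : Nat) : Int) from by omega]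
        rw [pvStep_mid _ _ _ (by rw [len_countdown]; omega)]
        simp only [Prod.mk.injEq]
        constructor
        · rw [len_countdown]
          rw [pyRange_neg_one_append (N : Int) (kk - (tri N : Int)) 0 (by omega) (by omega)]
          rw [show ((N : Int)) - (kk - ((tri N : Nat) : Int))
              = (((N - (kk - (tri N : Int)).toNat : Nat)) : Int) from by omega]
          rw [PySem.List.insert_natCast _ _ _
            (by simp only [List.length_append, PySem.List.length_pyRange_neg_one]; omega)]
          have hl1 : (PySem.List.pyRange (N : Int) (kk - (tri N : Int)) (-1)).length
              = N - (kk - (tri N : Int)).toNat := by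
            rw [PySem.List.length_pyRange_neg_one]; omega
          rw [List.take_left' hl1, List.drop_left' hl1]
          simp [List.append_assoc]
        · omega
      · -- still enough inversions left: the new element goes to the front
        have hfull := alt_eq_full N k (by rw [hkk]; omega)
        rw [hfull]
        have hfullS : k_swaps_to_sort_alt ((N : Int) + 1) k
            = PySem.List.pyRange ((N : Int) + 1) 0 (-1) := by
          rw [← hcast]
          exact alt_eq_full (N + 1) k (by rw [hkk, htriS]; omega)
        rw [hfullS]
        rw [show max (kk - ((tri N : Nat) : Int)) 0 = kk - ((tri N : Nat) : Int) from by omega]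
        rw [pvStep_big _ _ _ (by rw [len_countdown]; omega)]
        simp only [Prod.mk.injEq]
        constructor
        · rw [PySem.List.pyRange_neg_one_cons (by omega : (0:Int) < (N : Int) + 1)]
          norm_num
        · rw [len_countdown, htriS]; omega

theorem k_swaps_to_sort_eq_alt (n k : Int) : k_swaps_to_sort n k = k_swaps_to_sort_alt n k := by
  rw [A_eq_foldl]
  by_cases hn : n ≤ 0
  · rw [PySem.List.pyRange_one_eq_nil (by omega : n + 1 ≤ 1)]
    have hk0 : kstsFindM n (if k > 0 then k else 0) 0 = 0 := by
      rw [kstsFindM, dif_neg (by omega : ¬ (0:Int) < n)]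
    rw [alt_def, hk0, if_pos hn, PySem.List.pyRange_neg_one_eq_nil (by omega : n ≤ 0)]
    simp
  · obtain ⟨N, rfl⟩ : ∃ N : Nat, n = (N : Int) := ⟨n.toNat, by omega⟩
    have hN : 1 ≤ N := by
      by_contra h
      have : N = 0 := by omega
      subst this
      simp at hn
    rw [state_inv N k hN]

-- ===== VERDICT (by name: the statement is the Claim_ definition above) =====
theorem k_swaps_to_sort_spec : Claim_equal_k_swaps_to_sort := by
  intro n k _
  unfold Spec_k_swaps_to_sort
  exact k_swaps_to_sort_eq_alt n k
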